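-- pv_equiv track=rewrite | github.com/xiejun4/AI-Python-Project | pro_OTPlus_log_file_analysis/src/main.py | highlight_details
-- ===== SOURCE A (Python) =====
-- def highlight_details(lines):
--     """将包含 'Details' 的行及其下一行内容标记为红色"""
--     processed_lines = []
--     mark_next_red = False
--     for line in lines:
--         if 'Details' in line:
--             processed_line = f'<span style="color:red;">{line}</span>'
--             mark_next_red = True
--         elif mark_next_red:
--             processed_line = f'<span style="color:red;">{line}</span>'
--             mark_next_red = False
--         else:
--             processed_line = line
--         processed_lines.append(processed_line)
--     return processed_lines
-- ===== SOURCE B (Python) =====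
-- def highlight_details(lines):
--     """将包含 'Details' 的行及其下一行内容标记为红色"""
--     lines = list(lines)
--     prevs = [''] + lines[:-1]
--     return [f'<span style="color:red;">{line}</span>'
--             if 'Details' in line or 'Details' in prev
--             else line
--             for prev, line in zip(prevs, lines)]
-- ===== Notes on version B (the rewrite author's own statement) =====
-- stated objective: alternative
-- what changed: Replaces A's stateful one-pass loop with a carried mark_next_red flag by a stateless comprehension over each line zipped with its predecessor (the list shifted by one): a line is wrapped iff it or its predecessor contains 'Details'.
import Mathlib
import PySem

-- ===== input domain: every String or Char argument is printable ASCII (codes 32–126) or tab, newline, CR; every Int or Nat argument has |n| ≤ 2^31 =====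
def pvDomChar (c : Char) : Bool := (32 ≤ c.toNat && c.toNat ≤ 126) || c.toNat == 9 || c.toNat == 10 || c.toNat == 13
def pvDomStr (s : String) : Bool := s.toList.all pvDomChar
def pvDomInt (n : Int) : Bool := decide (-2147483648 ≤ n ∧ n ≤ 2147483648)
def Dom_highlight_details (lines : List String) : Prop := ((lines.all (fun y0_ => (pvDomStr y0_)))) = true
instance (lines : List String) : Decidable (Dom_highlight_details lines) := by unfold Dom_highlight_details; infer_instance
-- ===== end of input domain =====

-- B replaces A's carried mark_next_red flag by a stateless map over each line zipped with its predecessor (alternative decomposition, same cost).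


-- ===== PORT A =====
-- f'<span style="color:red;">{line}</span>' (same f-string in A and B; string concat via List Char, exact on ASCII)
def hlWrap (line : String) : String :=
  String.ofList ("<span style=\"color:red;\">".toList ++ line.toList ++ "</span>".toList)

def highlight_details (lines : List String) : List String :=
  (lines.foldl
    (fun (st : List String × Bool) line =>
      if PySem.Str.isIn "Details" line then (st.1 ++ [hlWrap line], true)
      else if st.2 then (st.1 ++ [hlWrap line], false)
      else (st.1 ++ [line], st.2))
    ([], false)).1

-- ===== PORT B =====
def highlight_details_alt (lines : List String) : List String :=
  let prevs := "" :: lines.dropLast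
  (prevs.zip lines).map (fun pl =>
    if PySem.Str.isIn "Details" pl.2 || PySem.Str.isIn "Details" pl.1 then hlWrap pl.2 else pl.2)

-- ===== PRECONDITION & SPEC =====
def Spec_highlight_details (lines : List String) (out : List String) : Prop := out = highlight_details_alt lines
instance (lines : List String) (out : List String) : Decidable (Spec_highlight_details lines out) := by unfold Spec_highlight_details; infer_instance

-- ===== CLAIM (what is proved, stated in full; the proofs are below) =====
def Claim_equal_highlight_details : Prop := ∀ (lines : List String), Dom_highlight_details lines → Spec_highlight_details lines (highlight_details lines)

-- ===== LEMMAS AND PROOFS =====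

-- reference form: the flag at each step equals "previous line contained 'Details'"
def hlRef (flag : Bool) : List String → List String
  | [] => []
  | l :: ls =>
      (if PySem.Str.isIn "Details" l || flag then hlWrap l else l) :: hlRef (PySem.Str.isIn "Details" l) ls

theorem hlA_loop (L : List String) (acc : List String) (flag : Bool) :
    (L.foldl
      (fun (st : List String × Bool) line =>
        if PySem.Str.isIn "Details" line then (st.1 ++ [hlWrap line], true)
        else if st.2 then (st.1 ++ [hlWrap line], false)
        else (st.1 ++ [line], st.2))
      (acc, flag)).1 = acc ++ hlRef flag L := by
  induction L generalizing acc flag with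
  | nil => simp [hlRef]
  | cons l ls ih =>
      cases h : PySem.Str.isIn "Details" l with
      | true =>
          simp only [List.foldl, hlRef, h, if_true, Bool.true_or]
          rw [ih]; simp
      | false =>
          cases flag with
          | true =>
              simp only [List.foldl, hlRef, h, Bool.false_eq_true, if_false, ite_true,
                Bool.false_or]
              rw [ih]; simp
          | false =>
              simp only [List.foldl, hlRef, h, Bool.false_eq_true, if_false,
                Bool.false_or]
              rw [ih]; simp

theorem hlB_loop (L : List String) (p : String) :
    ((p :: L.dropLast).zip L).map (fun pl =>
        if PySem.Str.isIn "Details" pl.2 || PySem.Str.isIn "Details" pl.1 then hlWrap pl.2 else pl.2)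
      = hlRef (PySem.Str.isIn "Details" p) L := by
  induction L generalizing p with
  | nil => simp [hlRef]
  | cons l ls ih =>
      cases ls with
      | nil => simp [hlRef]
      | cons l' ls' =>
          simp only [List.dropLast_cons₂, List.zip_cons_cons, List.map_cons, hlRef]
          exact congrArg _ (ih l)

-- ===== VERDICT (by name: the statement is the Claim_ definition above) =====
theorem highlight_details_spec : Claim_equal_highlight_details := by
  intro lines _
  unfold Spec_highlight_details highlight_details highlight_details_alt
  rw [hlA_loop, hlB_loop]
  rw [show PySem.Str.isIn "Details" "" = false from by decide]
  simp
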